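-- pv_equiv track=rewrite | github.com/netra212/DSA-Python | 10_searching_sorting_with_recursion.py | partitionFunction
-- ===== SOURCE A (Python) =====
-- def partitionFunction(l1, s, e):
--     # Taking pivot as last element.
--     pivot = l1[e]
--
--     i = s
--     rightPosition = s
--
--     while(i <= e-1):
--         if(l1[i] < pivot):
--             rightPosition += 1
--         i+=1
--     l1[rightPosition], l1[e] = l1[e], l1[rightPosition]
--
--     pivotIndex = rightPosition
--
--     start = s
--     end = e
--
--     while(start < pivotIndex and end > pivotIndex):
--         if(l1[start] < pivot):
--             start+=1
--         elif(l1[end] >= pivot):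
--             end-=1
--         else:
--             l1[start], l1[end] = l1[end], l1[start]
--             start+=1
--             end-=1
--
--     return pivotIndex
-- ===== SOURCE B (Python) =====
-- def partitionFunction(l1, s, e):
--     # Stable distribute-and-rewrite partition: collect the segment's elements into
--     # 'less' / 'rest' buckets, rewrite the segment as less + [pivot] + rest, and
--     # return the pivot's landing index.  Same return value as A; the in-place
--     # permutation left in l1 differs from A's swap-based one.
--     pivot = l1[e]
--     less, rest = [], []
--     for i in range(s, e):
--         (less if l1[i] < pivot else rest).append(l1[i])
--     for i, x in zip(range(s, e + 1), less + [pivot] + rest):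
--         l1[i] = x
--     return s + len(less)
-- ===== Notes on version B (the rewrite author's own statement) =====
-- stated objective: simpler
-- what changed: Replaces A's count loop plus interleaved two-cursor swap sweep with a stable distribute-and-rewrite partition: elements are bucketed into less/rest auxiliary lists and the segment is rewritten as less+[pivot]+rest; the returned pivot index is identical, the in-place permutation of l1 differs.
import Mathlib
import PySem

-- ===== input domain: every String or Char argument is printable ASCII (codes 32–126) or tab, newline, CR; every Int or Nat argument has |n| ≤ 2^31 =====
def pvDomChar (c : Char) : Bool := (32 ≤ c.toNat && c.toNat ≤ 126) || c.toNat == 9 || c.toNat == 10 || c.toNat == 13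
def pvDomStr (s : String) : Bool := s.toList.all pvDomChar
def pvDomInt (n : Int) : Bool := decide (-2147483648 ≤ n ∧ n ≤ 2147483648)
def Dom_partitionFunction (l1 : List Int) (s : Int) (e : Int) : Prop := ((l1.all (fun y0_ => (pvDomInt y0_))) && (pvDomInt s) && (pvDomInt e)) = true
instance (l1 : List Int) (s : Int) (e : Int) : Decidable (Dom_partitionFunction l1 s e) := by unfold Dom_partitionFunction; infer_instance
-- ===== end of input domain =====

-- B replaces A's count-then-two-cursor-swap partition by a stable distribute-and-rewrite partition
-- (bucket into less/rest, rewrite the segment as less+[pivot]+rest); both mutate l1 in Python but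
-- leave DIFFERENT permutations, so the equivalence proved here is about the RETURN value (pivot index) only.

-- ===== PORT A =====
-- Python simultaneous swap l1[a], l1[b] = l1[b], l1[a] (both sides read before either write).
def pfSwap (l : List Int) (a b : Int) : List Int :=
  PySem.List.pySetD (PySem.List.pySetD l a (PySem.List.pyGetD l b 0)) b (PySem.List.pyGetD l a 0)

-- A's first while loop: i from s while i <= e-1, counting elements < pivot into rightPosition.
-- Fuel bounds the remaining iterations ((e - i).toNat at entry); with adequate fuel the fuel-0
-- branch is never taken, so this is the loop step for step.
def pfCountLoop (l1 : List Int) (pivot e : Int) : Nat → Int → Int → Int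
  | 0, _, rp => rp
  | n + 1, i, rp =>
    if i ≤ e - 1 then
      pfCountLoop l1 pivot e n (i + 1) (if PySem.List.pyGetD l1 i 0 < pivot then rp + 1 else rp)
    else rp

-- A's second while loop: the interleaved two-cursor sweep mutating the list (its result is discarded
-- by A's return). Fuel bounds the iterations ((pIdx - st) + (en - pIdx) decreases each step).
def pfSweep (pivot pIdx : Int) : Nat → List Int → Int → Int → List Int
  | 0, l, _, _ => l
  | n + 1, l, st, en =>
    if st < pIdx ∧ en > pIdx then
      if PySem.List.pyGetD l st 0 < pivot then pfSweep pivot pIdx n l (st + 1) en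
      else if PySem.List.pyGetD l en 0 ≥ pivot then pfSweep pivot pIdx n l st (en - 1)
      else pfSweep pivot pIdx n (pfSwap l st en) (st + 1) (en - 1)
    else l

def partitionFunction (l1 : List Int) (s : Int) (e : Int) : Int :=
  let pivot := PySem.List.pyGetD l1 e 0
  let rightPosition := pfCountLoop l1 pivot e (e - s).toNat s s
  let l2 := pfSwap l1 rightPosition e
  let pivotIndex := rightPosition
  let _l3 := pfSweep pivot pivotIndex (e - s).toNat l2 s e
  pivotIndex

-- ===== PORT B =====
-- the bucketing loop: for i in range(s, e): append l1[i] to less or rest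
def pfDistribute (l1 : List Int) (pivot : Int) (idxs : List Int) : List Int × List Int :=
  idxs.foldl
    (fun (p : List Int × List Int) i =>
      let x := PySem.List.pyGetD l1 i 0
      if x < pivot then (p.1 ++ [x], p.2) else (p.1, p.2 ++ [x]))
    ([], [])

def partitionFunction_alt (l1 : List Int) (s : Int) (e : Int) : Int :=
  let pivot := PySem.List.pyGetD l1 e 0
  let lr := pfDistribute l1 pivot (PySem.List.pyRange s e 1)
  -- rewrite the segment: for i, x in zip(range(s, e+1), less + [pivot] + rest): l1[i] = x
  let _l2 := ((PySem.List.pyRange s (e + 1) 1).zip (lr.1 ++ [pivot] ++ lr.2)).foldl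
      (fun l p => PySem.List.pySetD l p.1 p.2) l1
  s + (lr.1.length : Int)

-- ===== PRECONDITION & SPEC =====
-- Exactly the inputs on which the Python A returns (every index it touches lies in Python range);
-- elsewhere A raises IndexError.
def Pre_partitionFunction (l1 : List Int) (s : Int) (e : Int) : Prop :=
  PySem.Raise.InRange l1.length s ∧ PySem.Raise.InRange l1.length e ∧
  ∀ i ∈ PySem.List.pyRange s e 1, PySem.Raise.InRange l1.length i
instance (l1 : List Int) (s : Int) (e : Int) : Decidable (Pre_partitionFunction l1 s e) := by
  unfold Pre_partitionFunction; infer_instance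

def pvWitness_partitionFunction : List Int × Int × Int := ([3, 1, 2], 0, 2)

def Spec_partitionFunction (l1 : List Int) (s : Int) (e : Int) (out : Int) : Prop := out = partitionFunction_alt l1 s e
instance (l1 : List Int) (s : Int) (e : Int) (out : Int) : Decidable (Spec_partitionFunction l1 s e out) := by unfold Spec_partitionFunction; infer_instance

-- ===== CLAIM (what is proved, stated in full; the proofs are below) =====
def Claim_equal_partitionFunction : Prop := ∀ (l1 : List Int) (s : Int) (e : Int), Dom_partitionFunction l1 s e → Pre_partitionFunction l1 s e → Spec_partitionFunction l1 s e (partitionFunction l1 s e)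

-- ===== LEMMAS AND PROOFS =====
-- A's counting loop equals rp + (count of elements < pivot over range(i, e)).
lemma pfCountLoop_eq (l1 : List Int) (pivot e : Int) :
    ∀ (n : Nat) (i rp : Int), (e - i).toNat ≤ n →
      pfCountLoop l1 pivot e n i rp =
        rp + ((PySem.List.pyRange i e 1).countP
          (fun j => decide (PySem.List.pyGetD l1 j 0 < pivot)) : Int) := by
  intro n
  induction n with
  | zero =>
    intro i rp h
    rw [pfCountLoop, PySem.List.pyRange_one_eq_nil (by omega)]
    simp
  | succ n ih =>
    intro i rp h
    rw [pfCountLoop]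
    by_cases hc : i ≤ e - 1
    · rw [if_pos hc, PySem.List.pyRange_one_cons (by omega : i < e), ih (i + 1) _ (by omega)]
      by_cases hlt : PySem.List.pyGetD l1 i 0 < pivot
      · simp only [List.countP_cons, hlt, decide_true, if_pos]
        push_cast; ring
      · simp only [List.countP_cons, hlt, decide_false, if_false]
        push_cast; ring
    · rw [if_neg hc, PySem.List.pyRange_one_eq_nil (by omega)]
      simp

-- B's bucketing loop: the 'less' bucket's length counts the indices with l1[i] < pivot.
lemma pfDistribute_fst_length (l1 : List Int) (pivot : Int) :
    ∀ (idxs : List Int) (acc : List Int × List Int),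
      (idxs.foldl
        (fun (p : List Int × List Int) i =>
          let x := PySem.List.pyGetD l1 i 0
          if x < pivot then (p.1 ++ [x], p.2) else (p.1, p.2 ++ [x]))
        acc).1.length
      = acc.1.length + idxs.countP (fun j => decide (PySem.List.pyGetD l1 j 0 < pivot)) := by
  intro idxs
  induction idxs with
  | nil => intro acc; simp
  | cons i t ih =>
    intro acc
    simp only [List.foldl_cons, List.countP_cons]
    by_cases hlt : PySem.List.pyGetD l1 i 0 < pivot
    · simp only [hlt, decide_true, if_pos, ih]
      simp; omega
    · simp only [hlt, decide_false, if_false, ih]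
      simp

-- ===== VERDICT (by name: the statement is the Claim_ definition above) =====
theorem partitionFunction_spec : Claim_equal_partitionFunction := by
  intro l1 s e _ _
  unfold Spec_partitionFunction partitionFunction partitionFunction_alt pfDistribute
  simp only [pfCountLoop_eq l1 _ e _ s s le_rfl, pfDistribute_fst_length]
  simp
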